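-- pv_equiv track=rewrite | github.com/jonadsimon/wonder-words-generator | analytics_helper_functions.py | get_num_overlaps_exact
-- ===== SOURCE A (Python) =====
-- from collections import Counter
--
-- def get_num_overlaps_exact(w1, w2):
--     overlaps = 0
--     # Assume that w1 always has the same fixed orientation
--     # (1) Assume w2 has the same orientation. Simulate passing the words over each other
--     #     and testing for compatible overlaps at the head & tail. Check the reverse orientation too.
--     # Pass the shorter word over the longer word.
--     if len(w1) < len(w2):
--         tmp1, tmp2, tmp2rev = w1, w2, w2[::-1]
--     else:
--         tmp1, tmp2, tmp2rev = w2, w1, w1[::-1]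
--     # Left overlap
--     for i in range(1,len(tmp1)):
--         if tmp1[-i:] == tmp2[:i]:
--             overlaps += 1
--         if tmp1[-i:] == tmp2rev[:i]: # check reverse orientation
--             overlaps += 1
--     # (ignore middle overlap because that implies one is substring of the other which is forbidden)
--     # Right overlap
--     for i in range(1,len(tmp1)):
--         if tmp1[:i] == tmp2[-i:]:
--             overlaps += 1
--         if tmp1[:i] == tmp2rev[-i:]: # check reverse orientation
--             overlaps += 1
--     # For all other, just need to check for point-wise overlaps, and multiple the result by 6
--     cnt1, cnt2 = Counter(w1), Counter(w2)
--     shared_letters = set(cnt1.keys()) & set(cnt2.keys())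
--     for letter in shared_letters:
--         overlaps += cnt1[letter] * cnt2[letter] * 6
--     return overlaps
-- ===== SOURCE B (Python) =====
-- def get_num_overlaps_exact(w1, w2):
--     # Pass the shorter word over the longer word (ties: w2 first, as the task intends).
--     if len(w1) < len(w2):
--         t1, t2 = w1, w2
--     else:
--         t1, t2 = w2, w1
--     m = len(t1)
--
--     def borders(a, b):
--         # Count i with 1 <= i < m and a[-i:] == b[:i] with the Z-function of the
--         # combined string s = b + '\x00' + a: z[k] = length of the longest common
--         # prefix of s[k:] and s, computed in O(len(s)) with the classic (l, r)
--         # match window.  A position k in the a-part with k + z[k] == n means the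
--         # whole suffix s[k:] (= a[-(n-k):]) is a prefix of s (= of b).
--         s = b + "\x00" + a
--         n = len(s)
--         z = [0] * n
--         l = r = 0
--         total = 0
--         for k in range(1, n):
--             if k < r:
--                 z[k] = min(r - k, z[k - l])
--             while k + z[k] < n and s[z[k]] == s[k + z[k]]:
--                 z[k] += 1
--             if k + z[k] > r:
--                 l, r = k, k + z[k]
--             if k > len(b) and k + z[k] == n and 1 <= n - k < m:
--                 total += 1
--         return total
--
--     t2r = t2[::-1]
--     overlaps = borders(t1, t2) + borders(t1, t2r) + borders(t2, t1) + borders(t2r, t1)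
--
--     # Pointwise letter overlaps: distinct letters of w1 in first-occurrence order.
--     pointwise = 0
--     for c in dict.fromkeys(w1):
--         pointwise += w1.count(c) * w2.count(c)
--     return overlaps + 6 * pointwise
-- ===== Notes on version B (the rewrite author's own statement) =====
-- stated objective: faster
-- what changed: The four families of per-length slice comparisons become one linear Z-function scan (classic (l,r) match-window algorithm) of a combined string b + '\x00' + a per orientation, counting positions whose Z-value reaches the end of the string, and the Counter/set-intersection letter pass becomes a single sum of w1.count(c)*w2.count(c) over the distinct letters of w1.
import Mathlib
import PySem

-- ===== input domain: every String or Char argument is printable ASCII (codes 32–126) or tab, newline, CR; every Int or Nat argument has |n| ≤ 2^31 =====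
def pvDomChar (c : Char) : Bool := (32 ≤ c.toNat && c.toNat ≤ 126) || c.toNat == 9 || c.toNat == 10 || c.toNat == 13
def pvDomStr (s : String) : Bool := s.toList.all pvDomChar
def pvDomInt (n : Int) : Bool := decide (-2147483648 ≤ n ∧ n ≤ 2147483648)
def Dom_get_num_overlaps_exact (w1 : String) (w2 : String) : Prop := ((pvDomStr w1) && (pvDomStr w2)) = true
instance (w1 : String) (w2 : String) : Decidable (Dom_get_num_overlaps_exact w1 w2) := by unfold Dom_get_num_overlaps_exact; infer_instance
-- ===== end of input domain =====

-- B replaces A's quadratic family of per-length slice comparisons by one linear Z-function scan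
-- (with the classic (l,r) match window) of a combined string b + '\x00' + a per orientation, and
-- A's Counter/set-intersection letter pass by a single sum over the distinct letters of w1.

-- ===== PORT A =====
def get_num_overlaps_exact (w1 : String) (w2 : String) : Int :=
  let l1 := w1.toList
  let l2 := w2.toList
  let t := if l1.length < l2.length then (l1, l2, l2.reverse) else (l2, l1, l1.reverse)
  let tmp1 := t.1
  let tmp2 := t.2.1
  let tmp2rev := t.2.2  -- w[::-1] (PySem.List.slice?_none_none_neg_one: s[::-1] is reverse)
  -- Left overlap
  let overlaps : Int := (PySem.List.pyRange 1 (tmp1.length : Int)).foldl (fun acc i =>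
    let acc := if PySem.List.slice tmp1 (some (-i)) none = PySem.List.slice tmp2 none (some i) then acc + 1 else acc
    if PySem.List.slice tmp1 (some (-i)) none = PySem.List.slice tmp2rev none (some i) then acc + 1 else acc) 0
  -- Right overlap
  let overlaps := (PySem.List.pyRange 1 (tmp1.length : Int)).foldl (fun acc i =>
    let acc := if PySem.List.slice tmp1 none (some i) = PySem.List.slice tmp2 (some (-i)) none then acc + 1 else acc
    if PySem.List.slice tmp1 none (some i) = PySem.List.slice tmp2rev (some (-i)) none then acc + 1 else acc) overlaps
  -- Counter(w1), Counter(w2), shared letters (a sum over a Python set: order-independent)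
  let cnt1 := PySem.Dict.counter l1
  let cnt2 := PySem.Dict.counter l2
  let shared := PySem.Set.inter (PySem.Set.ofList cnt1.keys) (PySem.Set.ofList cnt2.keys)
  shared.foldl (fun acc c => acc + cnt1.getD c 0 * cnt2.getD c 0 * 6) overlaps

-- ===== PORT B =====
-- the while loop inside Source B's Z loop: starting from the current z[k] it increments
-- z[k] while k + z[k] < n and s[z[k]] == s[k + z[k]]; for start value j0 its final
-- value is j0 plus the longest common prefix of s[k+j0:] and s[j0:], which pvLcp
-- computes by structural recursion (exact for 0 <= k: the loop compares the two
-- suffixes pointwise and s[k+j0:] is the shorter one).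
def pvLcp : List Char → List Char → Nat
  | a :: as, b :: bs => if a = b then pvLcp as bs + 1 else 0
  | _, _ => 0

-- one iteration of Source B's Z loop; st = (total, z, l, r)
def pvZStep (s : List Char) (n lb m : Nat) (st : Int × List Int × Int × Int) (k : Int) :
    Int × List Int × Int × Int :=
  let total := st.1
  let z := st.2.1
  let l := st.2.2.1
  let r := st.2.2.2
  let z := if k < r then PySem.List.pySetD z k (min (r - k) (PySem.List.pyGetD z (k - l) 0)) else z
  let j0 := PySem.List.pyGetD z k 0
  let j : Int := j0 + (pvLcp (s.drop (k + j0).toNat) (s.drop j0.toNat) : Nat)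
  let z := PySem.List.pySetD z k j
  let lr := if r < k + j then (k, k + j) else (l, r)
  let total := if (lb : Int) < k ∧ k + j = (n : Int) ∧ 1 ≤ (n : Int) - k ∧ (n : Int) - k < (m : Int) then total + 1 else total
  (total, z, lr.1, lr.2)

def pvBorders (a b : List Char) (m : Nat) : Int :=
  let s := b ++ '\x00' :: a
  let n := s.length
  ((PySem.List.pyRange 1 (n : Int)).foldl (pvZStep s n b.length m)
      ((0 : Int), List.replicate n (0 : Int), (0 : Int), (0 : Int))).1

def get_num_overlaps_exact_alt (w1 : String) (w2 : String) : Int :=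
  let l1 := w1.toList
  let l2 := w2.toList
  let t := if l1.length < l2.length then (l1, l2) else (l2, l1)
  let t1 := t.1
  let t2 := t.2
  let m := t1.length
  let t2r := t2.reverse  -- t2[::-1]
  let overlaps := pvBorders t1 t2 m + pvBorders t1 t2r m + pvBorders t2 t1 m + pvBorders t2r t1 m
  -- dict.fromkeys(w1): the distinct letters of w1 in first-occurrence order
  let pointwise := (PySem.List.dedup l1).foldl (fun acc c => acc + (l1.count c : Int) * (l2.count c : Int)) 0
  overlaps + 6 * pointwise

-- ===== PRECONDITION & SPEC =====
def Spec_get_num_overlaps_exact (w1 : String) (w2 : String) (out : Int) : Prop := out = get_num_overlaps_exact_alt w1 w2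
instance (w1 : String) (w2 : String) (out : Int) : Decidable (Spec_get_num_overlaps_exact w1 w2 out) := by unfold Spec_get_num_overlaps_exact; infer_instance

-- ===== CLAIM (what is proved, stated in full; the proofs are below) =====
def Claim_equal_get_num_overlaps_exact : Prop := ∀ (w1 : String) (w2 : String), Dom_get_num_overlaps_exact w1 w2 → Spec_get_num_overlaps_exact w1 w2 (get_num_overlaps_exact w1 w2)

-- ===== LEMMAS AND PROOFS =====

-- the canonical quantity both programs count per orientation: the number of i with
-- 1 ≤ i ≤ m-1 such that the length-i suffix of a equals the length-i prefix of b
def pvCnt (a b : List Char) (m : Nat) : Nat :=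
  (List.range' 1 (m - 1)).countP (fun i => decide (a.drop (a.length - i) = b.take i))

lemma pvLcp_le_left (x y : List Char) : pvLcp x y ≤ x.length := by
  induction x generalizing y with
  | nil => simp [pvLcp]
  | cons a as ih =>
    cases y with
    | nil => simp [pvLcp]
    | cons b bs =>
      by_cases hab : a = b <;> simp [pvLcp, hab] <;> exact ih bs

lemma pvLcp_take_eq (x y : List Char) : x.take (pvLcp x y) = y.take (pvLcp x y) := by
  induction x generalizing y with
  | nil => simp [pvLcp]
  | cons a as ih =>
    cases y with
    | nil => simp [pvLcp]
    | cons b bs =>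
      by_cases hab : a = b
      · subst hab; simp [pvLcp, ih bs]
      · simp [pvLcp, hab]

lemma pvLcp_split (x y : List Char) (j : Nat) (hx : j ≤ x.length) (hy : j ≤ y.length)
    (h : x.take j = y.take j) : pvLcp x y = j + pvLcp (x.drop j) (y.drop j) := by
  induction j generalizing x y with
  | zero => simp
  | succ j ih =>
    cases x with
    | nil => simp at hx
    | cons a as =>
      cases y with
      | nil => simp at hy
      | cons b bs =>
        simp only [List.take_succ_cons, List.cons.injEq] at h
        obtain ⟨rfl, htl⟩ := h
        rw [show pvLcp (a::as) (a::bs) = pvLcp as bs + 1 from by simp [pvLcp]]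
        simp only [List.drop_succ_cons]
        rw [ih as bs (by simpa using hx) (by simpa using hy) htl]
        omega

lemma take_drop_eq_of_take_eq (p q : List Char) (w d j : Nat) (hw : p.take w = q.take w)
    (hdj : d + j ≤ w) : (p.drop d).take j = (q.drop d).take j := by
  rw [List.take_drop, List.take_drop]
  rw [show p.take (d+j) = (p.take w).take (d+j) from by rw [List.take_take]; simp [Nat.min_eq_left hdj]]
  rw [show q.take (d+j) = (q.take w).take (d+j) from by rw [List.take_take]; simp [Nat.min_eq_left hdj]]
  rw [hw]
lemma pvLcp_eq_length_iff (x y : List Char) : pvLcp x y = x.length ↔ x <+: y := by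
  induction x generalizing y with
  | nil => simp [pvLcp]
  | cons a as ih =>
    cases y with
    | nil => simp [pvLcp]
    | cons b bs =>
      by_cases hab : a = b
      · subst hab
        simp [pvLcp, ih bs, List.cons_prefix_cons]
      · simp [pvLcp, hab, List.cons_prefix_cons]

lemma pyRange_natCast_eq (a n : Nat) :
    PySem.List.pyRange (a : Int) ((a + n : Nat) : Int) = (List.range' a n).map (fun (i : Nat) => ((i : Int))) := by
  induction n with
  | zero => simp [PySem.List.pyRange]
  | succ n ih =>
    have h1 : ((a + (n+1) : Nat) : Int) = ((a + n : Nat) : Int) + 1 := by push_cast; ring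
    rw [h1, PySem.List.pyRange_one_succ_right (by exact_mod_cast Nat.le_add_right a n), ih]
    rw [show n + 1 = n + 1 from rfl, List.range'_concat]
    simp

lemma countP_range'_rev (f : Nat → Bool) (s len n : Nat) (h : s + len = n) :
    (List.range' s len).countP (fun k => f (n - k)) = (List.range' 1 len).countP f := by
  induction len generalizing s with
  | zero => simp
  | succ len ih =>
    rw [List.range'_succ, List.countP_cons, ih (s+1) (by omega)]
    rw [show len + 1 = len + 1 from rfl, List.range'_concat, List.countP_append]
    have : n - s = 1 + 1 * len := by omega
    simp [this]

lemma drop_prefix_iff (a b : List Char) (i : Nat) (hia : i ≤ a.length) (hib : i ≤ b.length) :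
    ((b ++ '\x00' :: a).drop ((b ++ '\x00' :: a).length - i) <+: (b ++ '\x00' :: a)) ↔
      a.drop (a.length - i) = b.take i := by
  have hlen : (b ++ '\x00' :: a).length = b.length + 1 + a.length := by simp; omega
  have h1 : (b ++ '\x00' :: a).length - i = b.length + (1 + (a.length - i)) := by omega
  have h2 : (b ++ '\x00' :: a).drop ((b ++ '\x00' :: a).length - i) = a.drop (a.length - i) := by
    rw [h1, List.drop_length_add_append]
    simp [Nat.add_comm 1 (a.length - i)]
  have h3 : (a.drop (a.length - i)).length = i := by simp; omega
  rw [h2, List.prefix_iff_eq_take, h3, List.take_append_of_le_length hib]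
def ZInv (s : List Char) (n kN : Nat) (st : Int × List Int × Int × Int) : Prop :=
  st.2.1.length = n ∧
  (∃ lN rN : Nat, st.2.2.1 = (lN : Int) ∧ st.2.2.2 = (rN : Int) ∧
    ((lN = 0 ∧ rN = 0) ∨ (1 ≤ lN ∧ lN < kN ∧ rN ≤ lN + pvLcp (s.drop lN) s))) ∧
  (∀ t : Nat, 1 ≤ t → t < kN → st.2.1.getD t 0 = (pvLcp (s.drop t) s : Int)) ∧
  (∀ t : Nat, t < n → (kN ≤ t ∨ t = 0) → st.2.1.getD t 0 = 0)

lemma pvZStep_spec (s : List Char) (lb m : Nat) (kN : Nat) (st : Int × List Int × Int × Int)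
    (hk1 : 1 ≤ kN) (hkn : kN < s.length) (hInv : ZInv s s.length kN st) :
    ((pvZStep s s.length lb m st (kN : Int)).1
        = st.1 + (if lb < kN ∧ kN + pvLcp (s.drop kN) s = s.length ∧ 1 ≤ s.length - kN ∧ s.length - kN < m then 1 else 0))
    ∧ ZInv s s.length (kN + 1) (pvZStep s s.length lb m st (kN : Int)) := by
  obtain ⟨hzlen, ⟨lN, rN, hl, hr, hlr⟩, hzok, hz0⟩ := hInv
  obtain ⟨total, z, l, r⟩ := st
  simp only at hzlen hzok hz0
  simp only at hl hr
  subst hl hr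
  have hlcpl_le : pvLcp (s.drop lN) s ≤ s.length - lN := by
    have := pvLcp_le_left (s.drop lN) s
    simpa using this
  have hrn : rN ≤ s.length := by
    rcases hlr with ⟨h0, h1⟩ | ⟨h1, h2, h3⟩ <;> omega
  have hkz : kN < z.length := by omega
  -- the conditionally updated z and the start value j0 of the while loop
  have hstep : ∃ (z1 : List Int) (j0N : Nat),
      (if (kN : Int) < (rN : Int) then
          PySem.List.pySetD z (kN : Int) (min ((rN : Int) - (kN : Int)) (PySem.List.pyGetD z ((kN : Int) - (lN : Int)) 0))
        else z) = z1
      ∧ PySem.List.pyGetD z1 (kN : Int) 0 = (j0N : Int)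
      ∧ j0N ≤ s.length - kN
      ∧ (s.drop kN).take j0N = s.take j0N
      ∧ z1.length = s.length
      ∧ (∀ t : Nat, 1 ≤ t → t < kN → z1.getD t 0 = (pvLcp (s.drop t) s : Int))
      ∧ (∀ t : Nat, t < s.length → (kN + 1 ≤ t ∨ t = 0) → z1.getD t 0 = 0) := by
    by_cases hkr : kN < rN
    · -- window case: rN > 0, so the window is a real one (lN ≥ 1, lN < kN)
      obtain ⟨hl1, hlk, hwin⟩ : 1 ≤ lN ∧ lN < kN ∧ rN ≤ lN + pvLcp (s.drop lN) s := by
        rcases hlr with ⟨h0, h1⟩ | h <;> [omega; exact h]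
      set d := kN - lN with hd
      have hd1 : 1 ≤ d := by omega
      have hdk : d < kN := by omega
      have hzd : z.getD d 0 = (pvLcp (s.drop d) s : Int) := hzok d hd1 hdk
      have hcast1 : (kN : Int) - (lN : Int) = ((d : Nat) : Int) := by omega
      have hcast2 : (rN : Int) - (kN : Int) = ((rN - kN : Nat) : Int) := by omega
      refine ⟨z.set kN ((min (rN - kN) (pvLcp (s.drop d) s) : Nat) : Int), min (rN - kN) (pvLcp (s.drop d) s),
        ?_, ?_, ?_, ?_, ?_, ?_, ?_⟩
      · rw [if_pos (by exact_mod_cast hkr)]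
        rw [hcast1, PySem.List.pyGetD_natCast, hzd, hcast2]
        rw [PySem.List.pySetD_natCast]
        congr 1
        push_cast
        omega
      · rw [PySem.List.pyGetD_natCast, List.getD_eq_getElem _ _ (by simpa using hkz),
            List.getElem_set_self (by simpa using hkz)]
      · omega
      · -- the take-equality: the window plus z[k-l] give the first j0N characters
        set j0N := min (rN - kN) (pvLcp (s.drop d) s) with hj0
        have hstep1 : (s.drop kN).take j0N = (s.drop d).take j0N := by
          have hkd : s.drop kN = (s.drop lN).drop d := by
            rw [List.drop_drop]
            congr 1
            omega
          rw [hkd]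
          have := take_drop_eq_of_take_eq (s.drop lN) s (pvLcp (s.drop lN) s) d j0N
            (pvLcp_take_eq _ _) (by omega)
          simpa using this
        have hstep2 : (s.drop d).take j0N = s.take j0N := by
          have h1 : (s.drop d).take j0N = ((s.drop d).take (pvLcp (s.drop d) s)).take j0N := by
            rw [List.take_take]
            congr 1
            omega
          rw [h1, pvLcp_take_eq (s.drop d) s, List.take_take]
          congr 1
          omega
        rw [hstep1, hstep2]
      · simpa using hzlen
      · intro t h1t htk
        rw [List.getD_eq_getElem _ _ (by simp; omega),
            List.getElem_set_ne (by omega) (by simp; omega),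
            ← List.getD_eq_getElem _ _ (by omega)]
        exact hzok t h1t htk
      · intro t htn ht
        rw [List.getD_eq_getElem _ _ (by simp; omega),
            List.getElem_set_ne (by omega) (by simp; omega),
            ← List.getD_eq_getElem _ _ (by omega)]
        exact hz0 t htn (by omega)
    · -- no window: z unchanged, j0 = z[k] = 0
      refine ⟨z, 0, ?_, ?_, ?_, ?_, ?_, ?_, ?_⟩
      · rw [if_neg (by exact_mod_cast hkr)]
      · rw [PySem.List.pyGetD_natCast]
        simpa using hz0 kN hkn (Or.inl le_rfl)
      · omega
      · simp
      · exact hzlen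
      · exact hzok
      · intro t htn ht
        exact hz0 t htn (by omega)
  obtain ⟨z1, j0N, hz1, hj0, hj0le, htake, hz1len, hz1ok, hz1z⟩ := hstep
  have hlcpk : pvLcp (s.drop kN) s = j0N + pvLcp (s.drop (kN + j0N)) (s.drop j0N) := by
    have h := pvLcp_split (s.drop kN) s j0N (by simp; omega) (by omega) htake
    rw [h, List.drop_drop]
  have hcast3 : ((kN : Int) + (j0N : Int)).toNat = kN + j0N := by
    rw [show (kN : Int) + (j0N : Int) = ((kN + j0N : Nat) : Int) from by push_cast; ring, Int.toNat_natCast]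
  have hcast4 : ((j0N : Int)).toNat = j0N := Int.toNat_natCast j0N
  have hj' : (j0N : Int) + ((pvLcp (s.drop ((kN : Int) + (j0N : Int)).toNat) (s.drop ((j0N : Int)).toNat) : Nat) : Int)
      = ((pvLcp (s.drop kN) s : Nat) : Int) := by
    rw [hcast3, hcast4, hlcpk]
    push_cast
    ring
  have hzset : PySem.List.pySetD z1 (kN : Int) ((pvLcp (s.drop kN) s : Nat) : Int)
      = z1.set kN ((pvLcp (s.drop kN) s : Nat) : Int) :=
    PySem.List.pySetD_natCast z1 kN _
  constructor
  · -- the total component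
    simp only [pvZStep, hz1, hj0, hj']
    have hiff : ((lb : Int) < (kN : Int) ∧ (kN : Int) + ((pvLcp (s.drop kN) s : Nat) : Int) = (s.length : Int) ∧
          1 ≤ (s.length : Int) - (kN : Int) ∧ (s.length : Int) - (kN : Int) < (m : Int))
        ↔ (lb < kN ∧ kN + pvLcp (s.drop kN) s = s.length ∧ 1 ≤ s.length - kN ∧ s.length - kN < m) := by
      omega
    split_ifs with h1 h2 h2
    · rfl
    · exact absurd (hiff.mp h1) h2
    · exact absurd (hiff.mpr h2) h1
    · ring
  · -- the invariant at kN + 1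
    simp only [pvZStep, hz1, hj0, hj', hzset]
    refine ⟨?_, ?_, ?_, ?_⟩
    · by_cases hnew : (rN : Int) < (kN : Int) + ((pvLcp (s.drop kN) s : Nat) : Int) <;>
        simp [hnew, hz1len]
    · by_cases hnew : (rN : Int) < (kN : Int) + ((pvLcp (s.drop kN) s : Nat) : Int)
      · rw [if_pos hnew]
        exact ⟨kN, kN + pvLcp (s.drop kN) s, rfl, by push_cast; ring, Or.inr ⟨by omega, by omega, le_rfl⟩⟩
      · rw [if_neg hnew]
        refine ⟨lN, rN, rfl, rfl, ?_⟩
        rcases hlr with h | ⟨h1, h2, h3⟩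
        · exact Or.inl h
        · exact Or.inr ⟨h1, by omega, h3⟩
    · intro t h1t htk
      by_cases htk2 : t = kN
      · subst htk2
        rw [List.getD_eq_getElem _ _ (by simp; omega), List.getElem_set_self (by simp; omega)]
      · rw [List.getD_eq_getElem _ _ (by simp; omega),
            List.getElem_set_ne (by omega) (by simp; omega),
            ← List.getD_eq_getElem _ _ (by omega)]
        exact hz1ok t h1t (by omega)
    · intro t htn ht
      rw [List.getD_eq_getElem _ _ (by simp; omega),
          List.getElem_set_ne (by omega) (by simp; omega),
          ← List.getD_eq_getElem _ _ (by omega)]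
      exact hz1z t htn (by omega)
lemma pvZLoop (s : List Char) (lb m : Nat) :
    ∀ (len s₀ : Nat) (st : Int × List Int × Int × Int), 1 ≤ s₀ → s₀ + len = s.length →
      ZInv s s.length s₀ st →
      ((List.range' s₀ len).foldl (fun acc (kN : Nat) => pvZStep s s.length lb m acc ((kN : Nat) : Int)) st).1
        = st.1 + ((List.range' s₀ len).countP (fun kN =>
            decide (lb < kN ∧ kN + pvLcp (s.drop kN) s = s.length ∧
              1 ≤ s.length - kN ∧ s.length - kN < m)) : Int) := by
  intro len
  induction len with
  | zero => intro s₀ st _ _ _; simp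
  | succ len ih =>
    intro s₀ st h1 h2 hInv
    rw [List.range'_succ, List.foldl_cons, List.countP_cons]
    obtain ⟨ht, hinv'⟩ := pvZStep_spec s lb m s₀ st h1 (by omega) hInv
    rw [ih (s₀+1) _ (by omega) (by omega) hinv', ht]
    by_cases hp : lb < s₀ ∧ s₀ + pvLcp (s.drop s₀) s = s.length ∧
        1 ≤ s.length - s₀ ∧ s.length - s₀ < m
    · simp only [if_pos hp, decide_eq_true_eq, hp]
      push_cast
      ring
    · simp only [if_neg hp, decide_eq_true_eq, hp]
      push_cast
      ring

lemma pvBorders_eq (a b : List Char) (m : Nat) (hma : m ≤ a.length) (hmb : m ≤ b.length) :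
    pvBorders a b m = (pvCnt a b m : Nat) := by
  have hs : (b ++ '\x00' :: a).length = (b.length + 1) + a.length := by simp; omega
  set s := b ++ '\x00' :: a with hsdef
  unfold pvBorders
  simp only [← hsdef]
  -- the range 1 .. n-1 as a Nat range
  have hn1 : s.length = 1 + (s.length - 1) := by rw [hs]; omega
  have hpr := pyRange_natCast_eq 1 (s.length - 1)
  simp only [Nat.cast_one] at hpr
  rw [show ((s.length : Nat) : Int) = ((1 + (s.length - 1) : Nat) : Int) from by rw [← hn1], hpr,
      List.foldl_map]
  rw [pvZLoop s b.length m (s.length - 1) 1 _ le_rfl (by omega)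
      ⟨by simp, ⟨0, 0, rfl, rfl, Or.inl ⟨rfl, rfl⟩⟩, fun t h1 h2 => absurd (lt_of_le_of_lt h1 h2) (by omega),
       fun t ht _ => by rw [List.getD_eq_getElem _ _ (by simpa using ht)]; simp⟩]
  rw [zero_add]
  -- split off the b-part of the range, where lb < k is false
  have hsplit1 : List.range' 1 b.length ++ List.range' (1 + 1 * b.length) (a.length)
      = List.range' 1 (s.length - 1) := by
    rw [List.range'_append]
    congr 1
    omega
  rw [← hsplit1, List.countP_append]
  have hz1 : (List.range' 1 b.length).countP (fun kN =>
      decide (b.length < kN ∧ kN + pvLcp (s.drop kN) s = s.length ∧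
        1 ≤ s.length - kN ∧ s.length - kN < m)) = 0 := by
    apply List.countP_eq_zero.mpr
    intro k hk
    rcases List.mem_range'.mp hk with ⟨t, ht, rfl⟩
    simp only [decide_eq_true_eq, not_and]
    intro h
    omega
  rw [hz1, Nat.zero_add]
  -- on the a-part, rewrite the predicate to the canonical suffix-prefix condition
  have hcong : ∀ k ∈ List.range' (1 + 1 * b.length) a.length,
      ((fun kN => decide (b.length < kN ∧ kN + pvLcp (s.drop kN) s = s.length ∧
          1 ≤ s.length - kN ∧ s.length - kN < m)) k = true)
        ↔ ((fun i => decide (a.drop (a.length - i) = b.take i ∧ i < m)) (s.length - k) = true) := by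
    intro k hk
    rcases List.mem_range'.mp hk with ⟨t, ht, rfl⟩
    set k := 1 + 1 * b.length + 1 * t with hk2
    have hk1 : b.length + 1 ≤ k := by omega
    have hk3 : k < s.length := by rw [hs]; omega
    have hia : s.length - k ≤ a.length := by omega
    simp only [decide_eq_true_eq]
    have hlen : (s.drop k).length = s.length - k := List.length_drop
    have hfirst : (k + pvLcp (s.drop k) s = s.length) ↔ (s.drop k <+: s) := by
      rw [← pvLcp_eq_length_iff, hlen]
      omega
    by_cases hm : s.length - k < m
    · have hib : s.length - k ≤ b.length := by omega
      have hdp := drop_prefix_iff a b (s.length - k) hia hib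
      rw [← hsdef] at hdp
      rw [show s.length - (s.length - k) = k from by omega] at hdp
      constructor
      · rintro ⟨_, h1, _, _⟩
        exact ⟨hdp.mp (hfirst.mp h1), hm⟩
      · rintro ⟨h1, _⟩
        exact ⟨by omega, hfirst.mpr (hdp.mpr h1), by omega, hm⟩
    · constructor
      · rintro ⟨_, _, _, h3⟩; exact absurd h3 hm
      · rintro ⟨_, h2⟩; exact absurd h2 hm
  rw [List.countP_congr hcong]
  rw [countP_range'_rev (fun i => decide (a.drop (a.length - i) = b.take i ∧ i < m))
      (1 + 1 * b.length) a.length s.length (by rw [hs]; omega)]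
  -- reduce the range [1, a.length] to [1, m-1]
  by_cases hm0 : m = 0
  · subst hm0
    rw [List.countP_eq_zero.mpr ?_, pvCnt]
    · simp
    · intro i _
      simp
  · have hm1 : 1 ≤ m := Nat.one_le_iff_ne_zero.mpr hm0
    have hsplit : List.range' 1 (m-1) ++ List.range' (1 + 1*(m-1)) (a.length - (m-1)) = List.range' 1 a.length := by
      rw [List.range'_append]
      congr 1
      omega
    rw [← hsplit, List.countP_append]
    have h2z : (List.range' (1 + 1*(m-1)) (a.length - (m-1))).countP
        (fun i => decide (a.drop (a.length - i) = b.take i ∧ i < m)) = 0 := by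
      apply List.countP_eq_zero.mpr
      intro i hi
      rcases List.mem_range'.mp hi with ⟨t, ht, rfl⟩
      simp only [decide_eq_true_eq, not_and]
      intro _
      omega
    rw [h2z, Nat.add_zero, pvCnt, Nat.cast_inj]
    apply List.countP_congr
    intro i hi
    rcases List.mem_range'.mp hi with ⟨t, ht, rfl⟩
    simp only [decide_eq_true_eq]
    constructor
    · rintro ⟨h1, _⟩; exact h1
    · intro h1; exact ⟨h1, by omega⟩

lemma foldl_two_ites {α : Type} (c1 c2 : α → Prop) [DecidablePred c1] [DecidablePred c2]
    (l : List α) (z : Int) :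
    l.foldl (fun acc x =>
        let acc := if c1 x then acc + 1 else acc
        if c2 x then acc + 1 else acc) z
      = z + (l.countP (fun x => decide (c1 x)) : Int) + (l.countP (fun x => decide (c2 x)) : Int) := by
  have hb : (fun (acc : Int) x =>
        let acc := if c1 x then acc + 1 else acc
        if c2 x then acc + 1 else acc)
      = fun acc x => acc + ((if c1 x then (1:Int) else 0) + (if c2 x then (1:Int) else 0)) := by
    funext acc x
    by_cases h1 : c1 x <;> by_cases h2 : c2 x <;> simp [h1, h2] <;> ring
  rw [hb, PySem.List.foldl_add, PySem.List.sum_map_add_int]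
  have e1 : (fun x => if c1 x then (1:Int) else 0) = fun x => if (fun x => decide (c1 x)) x = true then (1:Int) else 0 := by
    funext x; simp
  have e2 : (fun x => if c2 x then (1:Int) else 0) = fun x => if (fun x => decide (c2 x)) x = true then (1:Int) else 0 := by
    funext x; simp
  rw [e1, e2, PySem.List.sum_map_ite_one_zero, PySem.List.sum_map_ite_one_zero]
  ring

lemma sum_map_filter_of_zero (l : List Char) (p : Char → Bool) (f : Char → Int)
    (h : ∀ x ∈ l, p x = false → f x = 0) :
    ((l.filter p).map f).sum = (l.map f).sum := by
  induction l with
  | nil => simp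
  | cons a l ih =>
    have ih' := ih (fun x hx => h x (List.mem_cons_of_mem a hx))
    by_cases hp : p a
    · simp [hp, ih']
    · have : f a = 0 := h a (List.mem_cons_self) (by simpa using hp)
      simp [hp, ih', this]

lemma countP_pyRange_one (m : Nat) (c : Int → Prop) [DecidablePred c] :
    ((PySem.List.pyRange 1 (m : Int)).countP fun i => decide (c i))
      = (List.range' 1 (m-1)).countP (fun (i : Nat) => decide (c ((i : Int)))) := by
  cases m with
  | zero => simp
  | succ m =>
    have : ((m + 1 : Nat) : Int) = ((1 + m : Nat) : Int) := by push_cast; ring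
    have hpr := pyRange_natCast_eq 1 m
    simp only [Nat.cast_one] at hpr
    rw [this, hpr, List.countP_map]
    simp [Function.comp_def]

lemma aCount_left (t1 t2 : List Char) :
    (PySem.List.pyRange 1 (t1.length : Int)).countP
        (fun i => decide (PySem.List.slice t1 (some (-i)) none = PySem.List.slice t2 none (some i)))
      = pvCnt t1 t2 t1.length := by
  rw [countP_pyRange_one t1.length
      (fun i => PySem.List.slice t1 (some (-i)) none = PySem.List.slice t2 none (some i))]
  apply List.countP_congr
  intro i hi
  have h1 : 0 < i := by
    rcases List.mem_range'.mp hi with ⟨t, ht, rfl⟩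
    omega
  simp only [decide_eq_true_eq]
  rw [PySem.List.slice_from_neg_natCast t1 i h1, PySem.List.slice_to_natCast]

lemma aCount_right (t1 t2 : List Char) :
    (PySem.List.pyRange 1 (t1.length : Int)).countP
        (fun i => decide (PySem.List.slice t1 none (some i) = PySem.List.slice t2 (some (-i)) none))
      = pvCnt t2 t1 t1.length := by
  rw [countP_pyRange_one t1.length
      (fun i => PySem.List.slice t1 none (some i) = PySem.List.slice t2 (some (-i)) none)]
  apply List.countP_congr
  intro i hi
  have h1 : 0 < i := by
    rcases List.mem_range'.mp hi with ⟨t, ht, rfl⟩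
    omega
  simp only [decide_eq_true_eq]
  rw [PySem.List.slice_from_neg_natCast t2 i h1, PySem.List.slice_to_natCast]
  exact eq_comm

lemma letters_eq (l1 l2 : List Char) :
    ((PySem.Set.inter (PySem.Set.ofList (PySem.Dict.counter l1).keys)
        (PySem.Set.ofList (PySem.Dict.counter l2).keys)).map
      (fun c => (PySem.Dict.counter l1).getD c 0 * (PySem.Dict.counter l2).getD c 0 * 6)).sum
    = 6 * ((PySem.List.dedup l1).map (fun c => (l1.count c : Int) * (l2.count c : Int))).sum := by
  rw [PySem.Dict.keys_counter, PySem.Dict.keys_counter,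
      PySem.Set.ofList_ofList, PySem.Set.ofList_ofList]
  have hfil : PySem.Set.inter (PySem.Set.ofList l1) (PySem.Set.ofList l2)
      = (PySem.Set.ofList l1).filter (fun c => (PySem.Set.ofList l2).contains c) := rfl
  rw [hfil]
  rw [sum_map_filter_of_zero _ _ _ ?_]
  · rw [PySem.List.dedup_eq_ofList]
    simp only [PySem.Dict.getD_counter]
    rw [show (fun c => ((l1.count c : Int)) * ((l2.count c : Int)) * 6)
          = fun c => ((fun c => (l1.count c : Int) * (l2.count c : Int)) c) * 6 from rfl,
        List.sum_map_mul_right]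
    ring
  · intro c _ hc
    have : c ∉ PySem.Set.ofList l2 := fun h => by
      rw [(PySem.Set.contains_iff _ _).mpr h] at hc; exact Bool.true_eq_false.mp hc
    have hc2 : c ∉ l2 := fun h => this ((PySem.Set.mem_ofList l2 c).mpr h)
    simp [PySem.Dict.getD_counter, List.count_eq_zero_of_not_mem hc2]


lemma main_core (t1 t2 l1 l2 : List Char) (h : t1.length ≤ t2.length) :
    (PySem.Set.inter (PySem.Set.ofList (PySem.Dict.counter l1).keys)
        (PySem.Set.ofList (PySem.Dict.counter l2).keys)).foldl
      (fun acc c => acc + (PySem.Dict.counter l1).getD c 0 * (PySem.Dict.counter l2).getD c 0 * 6)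
      ((PySem.List.pyRange 1 (t1.length : Int)).foldl (fun acc i =>
          let acc := if PySem.List.slice t1 none (some i) = PySem.List.slice t2 (some (-i)) none then acc + 1 else acc
          if PySem.List.slice t1 none (some i) = PySem.List.slice t2.reverse (some (-i)) none then acc + 1 else acc)
        ((PySem.List.pyRange 1 (t1.length : Int)).foldl (fun acc i =>
          let acc := if PySem.List.slice t1 (some (-i)) none = PySem.List.slice t2 none (some i) then acc + 1 else acc
          if PySem.List.slice t1 (some (-i)) none = PySem.List.slice t2.reverse none (some i) then acc + 1 else acc) 0))
    = (pvBorders t1 t2 t1.length + pvBorders t1 t2.reverse t1.length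
        + pvBorders t2 t1 t1.length + pvBorders t2.reverse t1 t1.length)
      + 6 * ((PySem.List.dedup l1).foldl (fun acc c => acc + (l1.count c : Int) * (l2.count c : Int)) 0) := by
  rw [foldl_two_ites (fun i => PySem.List.slice t1 (some (-i)) none = PySem.List.slice t2 none (some i))
        (fun i => PySem.List.slice t1 (some (-i)) none = PySem.List.slice t2.reverse none (some i))]
  rw [foldl_two_ites (fun i => PySem.List.slice t1 none (some i) = PySem.List.slice t2 (some (-i)) none)
        (fun i => PySem.List.slice t1 none (some i) = PySem.List.slice t2.reverse (some (-i)) none)]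
  rw [PySem.List.foldl_add, PySem.List.foldl_add]
  rw [aCount_left t1 t2, aCount_left t1 t2.reverse, aCount_right t1 t2, aCount_right t1 t2.reverse]
  rw [letters_eq l1 l2]
  have hr2 : t1.length ≤ t2.reverse.length := by simpa using h
  rw [pvBorders_eq t1 t2 t1.length le_rfl h,
      pvBorders_eq t1 t2.reverse t1.length le_rfl hr2,
      pvBorders_eq t2 t1 t1.length h le_rfl,
      pvBorders_eq t2.reverse t1 t1.length hr2 le_rfl]
  omega

-- ===== VERDICT (by name: the statement is the Claim_ definition above) =====
theorem get_num_overlaps_exact_spec : Claim_equal_get_num_overlaps_exact := by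
  intro w1 w2 _
  unfold Spec_get_num_overlaps_exact get_num_overlaps_exact get_num_overlaps_exact_alt
  by_cases hlt : w1.toList.length < w2.toList.length
  · simp only [if_pos hlt]
    exact main_core w1.toList w2.toList w1.toList w2.toList (le_of_lt hlt)
  · simp only [if_neg hlt]
    exact main_core w2.toList w1.toList w1.toList w2.toList (by omega)
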